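-- pv_equiv track=rewrite | github.com/Gxrco/Compiler-DLP | afd_compiler/utils/ast_functions.py | expand_char_class
-- ===== SOURCE A (Python) =====
-- def expand_char_class(class_str):
--     """
--     Expande una clase de caracteres del formato [a-z] o similar en un conjunto de caracteres.
--     Soporta rangos y caracteres individuales.
--     """
--     content = class_str[1:-1]  # Remueve los corchetes
--     chars = set()
--     i = 0
--     while i < len(content):
--         if i + 2 < len(content) and content[i+1] == '-':
--             start = content[i]
--             end = content[i+2]
--             for c in range(ord(start), ord(end) + 1):
--                 chars.add(chr(c))
--             i += 3
--         else:
--             chars.add(content[i])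
--             i += 1
--     return chars
-- ===== SOURCE B (Python) =====
-- import re
--
-- def expand_char_class(class_str):
--     """
--     Expande una clase de caracteres del formato [a-z] o similar en un conjunto de caracteres.
--     Soporta rangos y caracteres individuales.
--     """
--     chars = set()
--     for m in re.finditer(r'(.)-(.)|(.)', class_str[1:-1], re.DOTALL):
--         if m.group(1) is not None:
--             for c in range(ord(m.group(1)), ord(m.group(2)) + 1):
--                 chars.add(chr(c))
--         else:
--             chars.add(m.group(3))
--     return chars
-- ===== Notes on version B (the rewrite author's own statement) =====
-- stated objective: idiomatic
-- what changed: Replaces A's manual index-based while loop with look-ahead bookkeeping by a regex tokenization pass (re.finditer on '(.)-(.)|(.)' with DOTALL) that yields range and single-char tokens, each expanded into the set.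
import Mathlib
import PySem

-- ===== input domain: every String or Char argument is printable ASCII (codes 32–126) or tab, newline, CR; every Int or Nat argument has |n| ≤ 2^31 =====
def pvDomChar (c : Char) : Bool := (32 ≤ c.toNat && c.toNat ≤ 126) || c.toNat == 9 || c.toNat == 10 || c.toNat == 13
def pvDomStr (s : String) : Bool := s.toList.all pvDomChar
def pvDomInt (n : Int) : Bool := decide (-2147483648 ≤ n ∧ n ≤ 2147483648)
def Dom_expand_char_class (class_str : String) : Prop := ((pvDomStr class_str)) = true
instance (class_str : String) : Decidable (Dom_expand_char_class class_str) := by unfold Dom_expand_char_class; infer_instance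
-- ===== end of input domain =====

-- B replaces A's manual look-ahead index loop by a regex tokenization pass (idiomatic); same return value, no speed claim.
-- Both Pythons return a set; set insertion order coincides here, so the ports agree as lists too.

-- ===== PORT A =====
-- the body of A's while loop, recursing on the index i (Python's `while i < len(content)`)
def pvA_loop (content : List Char) (i : Nat) (chars : PySem.Set String) : PySem.Set String :=
  if h : i < content.length then
    if i + 2 < content.length && content[i+1]! == '-' then
      -- for c in range(ord(start), ord(end) + 1): chars.add(chr(c))
      pvA_loop content (i+3)
        ((PySem.List.pyRange (content[i]!.toNat : Int) ((content[i+2]!.toNat : Int) + 1) 1).foldl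
          (fun s c => PySem.Set.add s (String.ofList [Char.ofNat c.toNat])) chars)
    else
      pvA_loop content (i+1) (PySem.Set.add chars (String.ofList [content[i]!]))
  else chars
termination_by content.length - i

def expand_char_class (class_str : String) : List String :=
  pvA_loop (PySem.List.slice class_str.toList (some 1) (some (-1))) 0 PySem.Set.empty

-- ===== PORT B =====
-- hand port of re.finditer(r'(.)-(.)|(.)', content, re.DOTALL): exact for this pattern — at each
-- position the alternative `(.)-(.)` (three chars, middle one '-') is tried first, else `(.)` eats one char
def pvB_tokens : List Char → List ((Char × Char) ⊕ Char)
  | a :: b :: c :: rest =>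
      if b = '-' then Sum.inl (a, c) :: pvB_tokens rest
      else Sum.inr a :: pvB_tokens (b :: c :: rest)
  | a :: rest => Sum.inr a :: pvB_tokens rest
  | [] => []

-- body of B's for loop over the matches
def pvB_step (s : PySem.Set String) (t : (Char × Char) ⊕ Char) : PySem.Set String :=
  match t with
  | Sum.inl (a, b) =>
      (PySem.List.pyRange (a.toNat : Int) ((b.toNat : Int) + 1) 1).foldl
        (fun s c => PySem.Set.add s (String.ofList [Char.ofNat c.toNat])) s
  | Sum.inr a => PySem.Set.add s (String.ofList [a])

def expand_char_class_alt (class_str : String) : List String :=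
  (pvB_tokens (PySem.List.slice class_str.toList (some 1) (some (-1)))).foldl pvB_step PySem.Set.empty

-- ===== PRECONDITION & SPEC =====
def Spec_expand_char_class (class_str : String) (out : List String) : Prop := out = expand_char_class_alt class_str
instance (class_str : String) (out : List String) : Decidable (Spec_expand_char_class class_str out) := by unfold Spec_expand_char_class; infer_instance

-- ===== CLAIM (what is proved, stated in full; the proofs are below) =====
def Claim_equal_expand_char_class : Prop := ∀ (class_str : String), Dom_expand_char_class class_str → Spec_expand_char_class class_str (expand_char_class class_str)

-- ===== LEMMAS AND PROOFS =====

lemma pvA_loop_eq_tokens (content : List Char) (i : Nat) (chars : PySem.Set String) :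
    pvA_loop content i chars = (pvB_tokens (content.drop i)).foldl pvB_step chars := by
  fun_induction pvA_loop content i chars with
  | case1 i chars h hc ih =>
    rw [Bool.and_eq_true, decide_eq_true_eq, beq_iff_eq] at hc
    obtain ⟨h2, hd⟩ := hc
    rw [getElem!_pos content (i+1) (by omega)] at hd
    rw [List.drop_eq_getElem_cons h,
        List.drop_eq_getElem_cons (show i+1 < content.length by omega),
        List.drop_eq_getElem_cons (show i+1+1 < content.length by omega)]
    simp only [pvB_tokens, hd, if_pos, List.foldl_cons, pvB_step]
    rw [getElem!_pos content i h, getElem!_pos content (i+2) h2] at ih ⊢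
    exact ih
  | case2 i chars h hc ih =>
    rw [getElem!_pos content i h] at ih ⊢
    by_cases h2 : i + 2 < content.length
    · have hd : content[i+1]'(by omega) ≠ '-' := by
        intro hh
        apply hc
        rw [Bool.and_eq_true, decide_eq_true_eq, beq_iff_eq,
            getElem!_pos content (i+1) (by omega)]
        exact ⟨h2, hh⟩
      rw [List.drop_eq_getElem_cons h,
          List.drop_eq_getElem_cons (show i+1 < content.length by omega),
          List.drop_eq_getElem_cons (show i+1+1 < content.length by omega)]
      rw [List.drop_eq_getElem_cons (show i+1 < content.length by omega),
          List.drop_eq_getElem_cons (show i+1+1 < content.length by omega)] at ih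
      simp only [pvB_tokens, if_neg hd, List.foldl_cons, pvB_step] at ih ⊢
      exact ih
    · rw [List.drop_eq_getElem_cons h]
      have hlen : (content.drop (i+1)).length ≤ 1 := by
        simp [List.length_drop]; omega
      rcases hdrop : content.drop (i+1) with _ | ⟨x, _ | ⟨y, rest⟩⟩
      · simp only [pvB_tokens, List.foldl_cons, List.foldl_nil, pvB_step]
        rw [hdrop] at ih
        simpa [pvB_tokens] using ih
      · simp only [pvB_tokens, List.foldl_cons, pvB_step]
        rw [hdrop] at ih
        simpa [pvB_tokens] using ih
      · rw [hdrop] at hlen; simp at hlen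
  | case3 i chars h =>
    rw [List.drop_eq_nil_of_le (by omega)]
    simp [pvB_tokens]

-- ===== VERDICT (by name: the statement is the Claim_ definition above) =====
theorem expand_char_class_spec : Claim_equal_expand_char_class := by
  intro s _
  show _ = _
  rw [expand_char_class, expand_char_class_alt, pvA_loop_eq_tokens, List.drop_zero]
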